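-- pv_equiv track=rewrite | github.com/skylandersNFC/Disney-Infinity-NFC | Infinity_Tools/tools/Scripts/Bulk_Infinity_Reset.py | wipe_disney_infinity_data
-- ===== SOURCE A (Python) =====
-- def wipe_disney_infinity_data(data):
--     for sector in range(5):
--         base = sector * 64
--         for i in range(base + 0x20, base + 0x2F + 1):
--             if i < len(data):
--                 data[i] = 0x00
--     for sector in [1, 2]:
--         base = sector * 64
--         for i in range(base + 0x10, base + 0x1F + 1):
--             if i < len(data):
--                 data[i] = 0x00
--     return data
-- ===== SOURCE B (Python) =====
-- def wipe_disney_infinity_data(data):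
--     wiped = set()
--     for sector in range(5):
--         base = sector * 64
--         wiped.update(range(base + 0x20, base + 0x30))
--     for sector in [1, 2]:
--         base = sector * 64
--         wiped.update(range(base + 0x10, base + 0x20))
--     data[:] = [0 if i in wiped else v for i, v in enumerate(data)]
--     return data
-- ===== Notes on version B (the rewrite author's own statement) =====
-- stated objective: alternative
-- what changed: Instead of three index-mutation loops writing into the list, B first collects all offsets to wipe into one set and then rebuilds the list in a single enumerate pass, zeroing exactly the in-range collected offsets.
import Mathlib
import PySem

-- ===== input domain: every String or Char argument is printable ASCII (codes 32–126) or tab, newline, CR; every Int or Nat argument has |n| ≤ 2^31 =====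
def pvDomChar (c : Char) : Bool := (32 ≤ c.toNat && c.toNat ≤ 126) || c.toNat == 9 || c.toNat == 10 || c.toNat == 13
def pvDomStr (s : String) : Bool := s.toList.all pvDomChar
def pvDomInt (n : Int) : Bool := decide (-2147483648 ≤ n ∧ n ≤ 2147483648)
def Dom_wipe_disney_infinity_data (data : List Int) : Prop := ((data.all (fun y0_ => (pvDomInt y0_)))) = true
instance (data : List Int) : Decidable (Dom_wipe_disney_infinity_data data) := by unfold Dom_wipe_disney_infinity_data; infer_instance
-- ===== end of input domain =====

-- B collects all byte offsets to wipe into one set, then rebuilds the list in a single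
-- enumerate pass (alternative decomposition; both Pythons mutate `data` in place the same
-- way, and the equivalence proved here is about the returned value).


-- ===== PORT A =====
-- data[i] = 0x00 guarded by 'if i < len(data)' (i is always ≥ 0x10 here, so pySetD is exact)
def pvZeroStep (d : List Int) (i : Int) : List Int :=
  if i < (d.length : Int) then PySem.List.pySetD d i 0 else d

def wipe_disney_infinity_data (data : List Int) : List Int :=
  let d1 := (PySem.List.pyRange 0 5 1).foldl
    (fun d sector =>
      let base := sector * 64
      (PySem.List.pyRange (base + 0x20) (base + 0x2F + 1) 1).foldl pvZeroStep d) data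
  ([1, 2] : List Int).foldl
    (fun d sector =>
      let base := sector * 64
      (PySem.List.pyRange (base + 0x10) (base + 0x1F + 1) 1).foldl pvZeroStep d) d1

-- ===== PORT B =====
-- the set of offsets to wipe, built once (wiped.update(range(...)) loops of Source B)
def pvWipedOffsets : PySem.Set Int :=
  let s1 := (PySem.List.pyRange 0 5 1).foldl
    (fun s sector =>
      let base := sector * 64
      PySem.Set.update s (PySem.List.pyRange (base + 0x20) (base + 0x30) 1)) PySem.Set.empty
  ([1, 2] : List Int).foldl
    (fun s sector =>
      let base := sector * 64
      PySem.Set.update s (PySem.List.pyRange (base + 0x10) (base + 0x20) 1)) s1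

def wipe_disney_infinity_data_alt (data : List Int) : List Int :=
  (PySem.List.enumerate data 0).map
    (fun p => if PySem.Set.contains pvWipedOffsets p.1 then 0 else p.2)

-- ===== PRECONDITION & SPEC =====
def Spec_wipe_disney_infinity_data (data : List Int) (out : List Int) : Prop := out = wipe_disney_infinity_data_alt data
instance (data : List Int) (out : List Int) : Decidable (Spec_wipe_disney_infinity_data data out) := by unfold Spec_wipe_disney_infinity_data; infer_instance

-- ===== CLAIM (what is proved, stated in full; the proofs are below) =====
def Claim_equal_wipe_disney_infinity_data : Prop := ∀ (data : List Int), Dom_wipe_disney_infinity_data data → Spec_wipe_disney_infinity_data data (wipe_disney_infinity_data data)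

-- ===== LEMMAS AND PROOFS =====

-- A's seven wipe ranges, concatenated in the order A visits them
def pvW : List Int :=
  PySem.List.pyRange 0x20 0x30 1 ++ PySem.List.pyRange 0x60 0x70 1 ++
  PySem.List.pyRange 0xA0 0xB0 1 ++ PySem.List.pyRange 0xE0 0xF0 1 ++
  PySem.List.pyRange 0x120 0x130 1 ++
  PySem.List.pyRange 0x50 0x60 1 ++ PySem.List.pyRange 0x90 0xA0 1

lemma pvZeroStep_length (d : List Int) (i : Int) : (pvZeroStep d i).length = d.length := by
  unfold pvZeroStep; split <;> simp [PySem.List.length_pySetD]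

lemma foldZero_length (L : List Int) (d : List Int) :
    (L.foldl pvZeroStep d).length = d.length := by
  induction L generalizing d with
  | nil => rfl
  | cons i L ih => rw [List.foldl_cons, ih, pvZeroStep_length]

lemma foldZero_getElem (L : List Int) (hL : ∀ i ∈ L, 0 ≤ i) (d : List Int) (j : Nat)
    (hj : j < d.length) :
    (L.foldl pvZeroStep d)[j]? =
      some (if (j : Int) ∈ L then 0 else d[j]) := by
  induction L generalizing d with
  | nil => simp [hj]
  | cons i L ih =>
    have hi : 0 ≤ i := hL i (by simp)
    have hj' : j < (pvZeroStep d i).length := by rw [pvZeroStep_length]; exact hj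
    rw [List.foldl_cons, ih (fun x hx => hL x (List.mem_cons_of_mem _ hx)) _ hj']
    have hstep : (pvZeroStep d i)[j]'hj' = if (j : Int) = i then 0 else d[j] := by
      by_cases hlt : i < (d.length : Int)
      · simp only [pvZeroStep, hlt, if_true, PySem.List.pySetD_of_nonneg _ _ hi,
          List.getElem_set]
        by_cases h : (j : Int) = i
        · have hn : i.toNat = j := by omega
          simp [hn, h]
        · have hn : ¬ i.toNat = j := by omega
          simp [hn, h]
      · have hne : ¬ (j : Int) = i := by omega
        simp [pvZeroStep, hlt, hne]
    rw [hstep]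
    by_cases h1 : (j : Int) ∈ L <;> by_cases h2 : (j : Int) = i <;> simp [h1, h2]

lemma A_eq_foldW (d : List Int) : wipe_disney_infinity_data d = pvW.foldl pvZeroStep d := by
  have h5 : PySem.List.pyRange 0 5 1 = [0, 1, 2, 3, 4] := by decide
  unfold wipe_disney_infinity_data pvW
  rw [h5]
  simp only [List.foldl_cons, List.foldl_nil, List.foldl_append]
  norm_num

set_option maxRecDepth 40000 in
lemma wipedOffsets_eq : (pvWipedOffsets : List Int) = pvW := by decide

set_option maxRecDepth 40000 in
lemma pvW_nonneg : ∀ i ∈ pvW, 0 ≤ i := by decide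

lemma alt_getElem (d : List Int) (j : Nat) (hj : j < d.length) :
    (wipe_disney_infinity_data_alt d)[j]? =
      some (if (j : Int) ∈ pvW then 0 else d[j]) := by
  have hj2 : j < (wipe_disney_infinity_data_alt d).length := by
    simp [wipe_disney_infinity_data_alt, PySem.List.length_enumerate, hj]
  rw [List.getElem?_eq_getElem hj2]
  unfold wipe_disney_infinity_data_alt
  rw [List.getElem_map, PySem.List.getElem_enumerate]
  simp only [wipedOffsets_eq]
  by_cases h : (j : Int) ∈ pvW
  · simp [h]
  · simp [h]

set_option maxRecDepth 40000 in
set_option maxHeartbeats 1000000 in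
lemma main_eq (d : List Int) : wipe_disney_infinity_data d = wipe_disney_infinity_data_alt d := by
  rw [A_eq_foldW]
  apply List.ext_getElem
  · rw [foldZero_length]
    simp [wipe_disney_infinity_data_alt, PySem.List.length_enumerate]
  · intro j h1 h2
    have hj : j < d.length := by rw [← foldZero_length pvW d]; exact h1
    have := (foldZero_getElem pvW pvW_nonneg d j hj).trans (alt_getElem d j hj).symm
    rw [List.getElem?_eq_getElem h1, List.getElem?_eq_getElem h2] at this
    exact Option.some.inj this

-- ===== VERDICT (by name: the statement is the Claim_ definition above) =====
theorem wipe_disney_infinity_data_spec : Claim_equal_wipe_disney_infinity_data := by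
  intro d _
  unfold Spec_wipe_disney_infinity_data
  exact main_eq d
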